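-- pv_equiv track=rewrite | github.com/rodrigo-castellano/keras_ns_grounders | ns_lib/dataset.py | split_by_corruptions
-- ===== SOURCE A (Python) =====
-- def split_by_corruptions(batch):
--     '''
--     Given a batch, split it in subbatches with the same number of corruptions in each subbatch. In this way it is easy to convert it to a pytorch version.
--     '''
--     n_queries = len(batch)
--     subbatches = {}
--     for i in range(n_queries):
--         n_corruptions = len(batch[i])
--         if n_corruptions not in subbatches:
--             subbatches[n_corruptions] = []
--         subbatches[n_corruptions].append([batch[i]])
--     return subbatches
-- ===== SOURCE B (Python) =====
-- def split_by_corruptions(batch):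
--     # Two-pass: distinct corruption counts in first-appearance order, then one
--     # comprehension per count collecting its wrapped queries.
--     order = list(dict.fromkeys(len(q) for q in batch))
--     return {n: [[q] for q in batch if len(q) == n] for n in order}
-- ===== Notes on version B (the rewrite author's own statement) =====
-- stated objective: idiomatic
-- what changed: A accumulates into a dict in one indexed loop with a membership check per element; B first dedups the corruption counts in first-appearance order and then builds each group with a filtering comprehension (two passes, no mutable dict accumulation).
import Mathlib
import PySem

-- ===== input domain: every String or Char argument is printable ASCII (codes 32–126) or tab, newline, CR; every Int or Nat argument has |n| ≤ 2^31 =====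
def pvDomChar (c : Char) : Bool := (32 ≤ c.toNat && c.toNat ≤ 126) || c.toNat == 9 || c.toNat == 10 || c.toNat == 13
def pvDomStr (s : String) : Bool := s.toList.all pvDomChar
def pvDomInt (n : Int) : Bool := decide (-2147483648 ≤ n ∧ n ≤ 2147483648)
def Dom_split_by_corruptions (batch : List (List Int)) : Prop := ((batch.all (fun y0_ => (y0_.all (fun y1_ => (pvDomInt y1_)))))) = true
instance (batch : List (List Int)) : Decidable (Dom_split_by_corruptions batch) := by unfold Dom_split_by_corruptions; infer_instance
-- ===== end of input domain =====

-- B replaces A's single indexed dict-accumulation loop by an idiomatic two-pass form: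
-- dedup the corruption counts in first-appearance order, then one filtering pass per count.


-- ===== PORT A =====
-- loop body of A: ensure the key exists with [], then append [q] to d[n] (get-then-set)
def stepA (d : PySem.Dict Int (List (List (List Int)))) (q : List Int) :
    PySem.Dict Int (List (List (List Int))) :=
  let n : Int := q.length
  let d' := if d.contains n then d else d.insert n []
  d'.insert n (d'.getD n [] ++ [[q]])

def split_by_corruptions (batch : List (List Int)) : List (Int × List (List (List Int))) :=
  let n_queries : Int := batch.length
  let subbatches : PySem.Dict Int (List (List (List Int))) :=
    (PySem.List.pyRange 0 n_queries 1).foldl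
      (fun d i => stepA d (PySem.List.pyGetD batch i []))
      PySem.Dict.empty
  subbatches.items

-- ===== PORT B =====
def split_by_corruptions_alt (batch : List (List Int)) : List (Int × List (List (List Int))) :=
  (PySem.List.dedup (batch.map (fun q => (q.length : Int)))).map
    (fun n => (n, (batch.filter (fun q => (q.length : Int) == n)).map (fun q => [q])))

-- ===== PRECONDITION & SPEC =====
def Spec_split_by_corruptions (batch : List (List Int)) (out : List (Int × List (List (List Int)))) : Prop := out = split_by_corruptions_alt batch
instance (batch : List (List Int)) (out : List (Int × List (List (List Int)))) : Decidable (Spec_split_by_corruptions batch out) := by unfold Spec_split_by_corruptions; infer_instance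

-- ===== CLAIM (what is proved, stated in full; the proofs are below) =====
def Claim_equal_split_by_corruptions : Prop := ∀ (batch : List (List Int)), Dom_split_by_corruptions batch → Spec_split_by_corruptions batch (split_by_corruptions batch)

-- ===== LEMMAS AND PROOFS =====

-- A's loop body ("ensure key, then get-and-set-appended") is exactly a Python d.modify step.
theorem stepA_eq_modify (d : PySem.Dict Int (List (List (List Int)))) (q : List Int) :
    stepA d q = d.modify (q.length : Int) [] (· ++ [[q]]) := by
  unfold stepA
  by_cases h : d.contains (q.length : Int)
  · simp [h, PySem.Dict.modify]
  · simp only [h, Bool.false_eq_true, if_false]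
    rw [PySem.Dict.getD_insert_self]
    apply PySem.Dict.ext
    rw [PySem.Dict.items_insert_of_contains _ _ (PySem.Dict.contains_insert_self d _ _),
        PySem.Dict.items_insert_of_not_contains _ _ (by simpa using h),
        PySem.Dict.modify, PySem.Dict.items_insert_of_not_contains _ _ (by simpa using h)]
    rw [List.map_append]
    have hkeys : ∀ p ∈ d.items, p.1 ≠ (q.length : Int) := by
      intro p hp heq
      have hmem : (q.length : Int) ∈ d.keys := by
        simpa [heq] using PySem.Dict.mem_keys_of_mem_items d hp
      rw [← PySem.Dict.contains_iff_mem_keys] at hmem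
      simp [h] at hmem
    have hmap : d.items.map (fun p => if p.1 == (q.length : Int) then ((q.length : Int), [] ++ [[q]]) else p)
        = d.items.map id :=
      List.map_congr_left (fun p hp => by simp [hkeys p hp])
    simp only [hmap, List.map_id]
    rw [PySem.Dict.getD_of_not_contains d _ (by simpa using h)]
    simp

-- items of a nodup-keyed dict are its keys paired with their getD values.
theorem items_eq_map_keys (d : PySem.Dict Int (List (List (List Int)))) (h : d.keys.Nodup) :
    d.items = d.keys.map (fun k => (k, d.getD k [])) := by
  have hk : d.keys = d.items.map (·.1) := by simp only [PySem.Dict.keys]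
  rw [hk, List.map_map]
  symm
  calc d.items.map (fun p => (p.1, d.getD p.1 []))
      = d.items.map id := by
        apply List.map_congr_left
        intro p hp
        have := PySem.Dict.getD_of_mem_items (d := d) (k := p.1) (v := p.2) (by simpa using hp) h (d0 := [])
        simp [this]
    _ = d.items := List.map_id _

-- ===== VERDICT (by name: the statement is the Claim_ definition above) =====
theorem split_by_corruptions_spec : Claim_equal_split_by_corruptions := by
  intro batch _
  show split_by_corruptions batch = split_by_corruptions_alt batch
  simp only [split_by_corruptions]
  rw [PySem.List.foldl_pyRange_zero_pyGetD' batch [] stepA PySem.Dict.empty]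
  have hstep : stepA = fun d q => d.modify (q.length : Int) [] (· ++ [[q]]) :=
    funext fun d => funext fun q => stepA_eq_modify d q
  have hfold :
      batch.foldl stepA PySem.Dict.empty
      = (batch.map (fun q => ((q.length : Int), [q]))).foldl
          (fun d p => d.modify p.1 [] (· ++ [p.2])) PySem.Dict.empty := by
    rw [List.foldl_map, hstep]
  rw [hfold]
  set F := (batch.map (fun q => ((q.length : Int), [q]))).foldl
      (fun d p => d.modify p.1 [] (· ++ [p.2])) PySem.Dict.empty with hF
  have hnodup : F.keys.Nodup := by
    rw [hF]
    exact PySem.Dict.nodup_keys_foldl_modify_key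
      (batch.map (fun q => ((q.length : Int), [q])))
      (fun p => p.1) []
      (fun _ p v => v ++ [p.2]) PySem.Dict.empty (by simp)
  have hkeys : F.keys = PySem.List.dedup (batch.map (fun q => (q.length : Int))) := by
    rw [hF, PySem.Dict.keys_foldl_modify_key
      (batch.map (fun q => ((q.length : Int), [q])))
      (fun p => p.1) []
      (fun _ p v => v ++ [p.2]) PySem.Dict.empty]
    simp only [pysem, List.map_map, Function.comp_def]
    rw [← List.foldl_map]
    rfl
  rw [items_eq_map_keys F hnodup, hkeys]
  unfold split_by_corruptions_alt
  apply List.map_congr_left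
  intro n _
  have := PySem.Dict.getD_foldl_modify_append (batch.map (fun q => ((q.length : Int), [q])))
      PySem.Dict.empty n
  rw [hF, this]
  simp [List.filter_map, Function.comp_def]
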